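-- pv_equiv track=rewrite | github.com/mumtazmaqsood/python_a1 | list/list_yt.py | seperate_even_odd
-- ===== SOURCE A (Python) =====
-- def seperate_even_odd(l):
--     even_list = []
--     odd_list = []
--     for i in range(len(l)):
--         if i % 2 == 0:
--             even_list.append(i)
--         else:
--             odd_list.append(i)
--     return even_list, odd_list
-- ===== SOURCE B (Python) =====
-- def seperate_even_odd(l):
--     n = len(l)
--     return list(range(0, n, 2)), list(range(1, n, 2))
-- ===== Notes on version B (the rewrite author's own statement) =====
-- stated objective: simpler
-- what changed: Replaces the per-index loop with its parity branch by the closed form: the two outputs are exactly range(0,n,2) and range(1,n,2) for n = len(l), computed directly with strided ranges.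
import Mathlib
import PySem

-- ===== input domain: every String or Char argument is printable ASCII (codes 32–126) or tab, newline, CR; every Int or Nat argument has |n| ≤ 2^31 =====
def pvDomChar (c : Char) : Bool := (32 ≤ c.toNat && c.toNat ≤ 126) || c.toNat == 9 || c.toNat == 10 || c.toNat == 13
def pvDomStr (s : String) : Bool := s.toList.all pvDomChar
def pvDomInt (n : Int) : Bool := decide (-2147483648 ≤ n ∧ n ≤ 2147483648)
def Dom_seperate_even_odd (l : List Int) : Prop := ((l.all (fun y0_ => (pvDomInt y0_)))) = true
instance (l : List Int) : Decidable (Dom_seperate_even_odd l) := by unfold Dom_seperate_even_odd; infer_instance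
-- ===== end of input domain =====

-- B replaces A's per-index loop and parity branch by the closed form: the outputs are
-- range(0, n, 2) and range(1, n, 2) for n = len(l). Objective: simpler.


-- ===== PORT A =====
def seperate_even_odd (l : List Int) : List Int × List Int :=
  (PySem.List.pyRange 0 (l.length : Int) 1).foldl
    (fun (s : List Int × List Int) i =>
      if i % 2 = 0 then (s.1 ++ [i], s.2) else (s.1, s.2 ++ [i]))
    ([], [])

-- ===== PORT B =====
def seperate_even_odd_alt (l : List Int) : List Int × List Int :=
  (PySem.List.pyRange 0 (l.length : Int) 2, PySem.List.pyRange 1 (l.length : Int) 2)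

-- ===== PRECONDITION & SPEC =====
def Spec_seperate_even_odd (l : List Int) (out : List Int × List Int) : Prop := out = seperate_even_odd_alt l
instance (l : List Int) (out : List Int × List Int) : Decidable (Spec_seperate_even_odd l out) := by unfold Spec_seperate_even_odd; infer_instance

-- ===== CLAIM (what is proved, stated in full; the proofs are below) =====
def Claim_equal_seperate_even_odd : Prop := ∀ (l : List Int), Dom_seperate_even_odd l → Spec_seperate_even_odd l (seperate_even_odd l)

-- ===== LEMMAS AND PROOFS =====

-- closed form for a stride-2 range starting at 0
theorem pyRange2_zero (n : Nat) :
    PySem.List.pyRange 0 (n : Int) 2 = (List.range ((n + 1) / 2)).map (fun (k : Nat) => (2 * (k : Int))) := by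
  rw [PySem.List.pyRange_of_pos 0 (n : Int) (by norm_num : (0:Int) < 2)]
  have hcount : (if (0:Int) < n then (((n : Int) - 0 + 2 - 1) / 2).toNat else 0) = (n + 1) / 2 := by
    split_ifs with h <;> omega
  rw [hcount]
  exact List.map_congr_left (fun k _ => by ring)

-- closed form for a stride-2 range starting at 1
theorem pyRange2_one (n : Nat) :
    PySem.List.pyRange 1 (n : Int) 2 = (List.range (n / 2)).map (fun (k : Nat) => (1 + 2 * (k : Int))) := by
  rw [PySem.List.pyRange_of_pos 1 (n : Int) (by norm_num : (0:Int) < 2)]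
  have hcount : (if (1:Int) < n then (((n : Int) - 1 + 2 - 1) / 2).toNat else 0) = n / 2 := by
    split_ifs with h <;> omega
  rw [hcount]

-- A's loop over range(n), in closed form
theorem loopA (n : Nat) :
    (PySem.List.pyRange 0 (n : Int) 1).foldl
      (fun (s : List Int × List Int) i =>
        if i % 2 = 0 then (s.1 ++ [i], s.2) else (s.1, s.2 ++ [i]))
      ([], [])
    = ((List.range ((n + 1) / 2)).map (fun (k : Nat) => (2 * (k : Int))),
       (List.range (n / 2)).map (fun (k : Nat) => (1 + 2 * (k : Int)))) := by
  induction n with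
  | zero => simp [PySem.List.pyRange_one_eq_nil]
  | succ m ih =>
    have hstep : PySem.List.pyRange 0 ((m + 1 : Nat) : Int) 1
        = PySem.List.pyRange 0 (m : Int) 1 ++ [(m : Int)] := by
      have := PySem.List.pyRange_one_succ_right (a := 0) (b := (m : Int)) (by positivity)
      simpa using this
    rw [hstep, List.foldl_append, ih]
    by_cases hpar : m % 2 = 0
    · have hm : (m : Int) % 2 = 0 := by omega
      simp only [List.foldl_cons, List.foldl_nil, hm, if_true]
      rw [Prod.mk.injEq]
      have h1 : (m + 1 + 1) / 2 = (m + 1) / 2 + 1 := by omega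
      have h2 : (m + 1) / 2 = m / 2 := by omega
      refine ⟨?_, ?_⟩
      · rw [h1, h2, List.range_succ, List.map_append]
        simp only [List.map_cons, List.map_nil]
        congr 2
        omega
      · rw [h2]
    · have hm : ¬ ((m : Int) % 2 = 0) := by omega
      simp only [List.foldl_cons, List.foldl_nil, hm, if_false]
      rw [Prod.mk.injEq]
      have h1 : (m + 1 + 1) / 2 = (m + 1) / 2 := by omega
      have h2 : (m + 1) / 2 = m / 2 + 1 := by omega
      refine ⟨?_, ?_⟩
      · rw [h1]
      · rw [h2, List.range_succ, List.map_append]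
        simp only [List.map_cons, List.map_nil]
        congr 2
        omega

-- ===== VERDICT (by name: the statement is the Claim_ definition above) =====
theorem seperate_even_odd_spec : Claim_equal_seperate_even_odd := by
  intro l _
  unfold Spec_seperate_even_odd seperate_even_odd seperate_even_odd_alt
  rw [loopA l.length, pyRange2_zero l.length, pyRange2_one l.length]
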